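-- pv_equiv track=rewrite | github.com/shyke0611/Coin_Detection_Pipeline | CS373_coin_detection_extension.py | applyLaplacianFilter
-- ===== SOURCE A (Python) =====
-- def createInitializedGreyscalePixelArray(image_width, image_height, initValue = 0):
--     new_pixel_array = []
--     for _ in range(image_height):
--         new_row = []
--         for _ in range(image_width):
--             new_row.append(initValue)
--         new_pixel_array.append(new_row)
--
--     return new_pixel_array
--
-- def applyLaplacianFilter(px_array):
--     laplacian_kernel = [
--         [1, 1, 1],
--         [1, -8, 1],
--         [1, 1, 1]
--     ]
--
--     width, height = len(px_array[0]), len(px_array)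
--     edges = createInitializedGreyscalePixelArray(width, height)
--
--     for i in range(1, height - 1):
--         for j in range(1, width - 1):
--             filtered_value = 0
--             for m in range(3):
--                 for n in range(3):
--                     filtered_value += laplacian_kernel[m][n] * px_array[i + m - 1][j + n - 1]
--             edges[i][j] = abs(filtered_value)
--
--     return edges
-- ===== SOURCE B (Python) =====
-- def applyLaplacianFilter(px_array):
--     height = len(px_array)
--     width = len(px_array[0])
--     edges = [[0] * width for _ in range(height)]
--     if height < 3 or width < 3:
--         return edges
--     for i in range(1, height - 1):
--         up, mid, down = px_array[i - 1], px_array[i], px_array[i + 1]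
--         vs = [up[j] + mid[j] + down[j] for j in range(width)]
--         row = edges[i]
--         for j in range(1, width - 1):
--             row[j] = abs(vs[j - 1] + vs[j] + vs[j + 1] - 9 * mid[j])
--     return edges
-- ===== Notes on version B (the rewrite author's own statement) =====
-- stated objective: faster
-- what changed: Replaces the per-pixel 3x3 kernel convolution (9 multiply-adds per interior pixel) by a separable pass: per interior row one vertical-triple-sum array is built, and each pixel is abs(three horizontal sums of it minus 9*center), using the identity Laplacian = 3x3 block sum - 9*center.
import Mathlib
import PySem

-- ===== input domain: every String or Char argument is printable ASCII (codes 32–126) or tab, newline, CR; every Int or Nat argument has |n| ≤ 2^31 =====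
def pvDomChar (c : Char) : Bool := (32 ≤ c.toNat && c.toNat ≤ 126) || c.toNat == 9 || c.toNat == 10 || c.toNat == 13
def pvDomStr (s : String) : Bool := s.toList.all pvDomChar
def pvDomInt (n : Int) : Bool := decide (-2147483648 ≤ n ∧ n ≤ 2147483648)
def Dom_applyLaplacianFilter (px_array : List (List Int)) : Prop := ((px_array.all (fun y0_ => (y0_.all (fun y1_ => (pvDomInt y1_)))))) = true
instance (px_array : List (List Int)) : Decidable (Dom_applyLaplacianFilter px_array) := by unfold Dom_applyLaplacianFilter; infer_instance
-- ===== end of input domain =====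

-- B replaces A's per-pixel 3x3 kernel convolution by a separable pass (vertical triple sums,
-- then horizontal triple sums minus 9*center), a constant-factor speedup; return values proved equal.

-- ===== PORT A =====
def createInitializedGreyscalePixelArray (image_width image_height initValue : Int) : List (List Int) :=
  (PySem.List.pyRange 0 image_height 1).foldl (fun new_pixel_array _ =>
    new_pixel_array ++ [(PySem.List.pyRange 0 image_width 1).foldl (fun new_row _ => new_row ++ [initValue]) []]) []

def applyLaplacianFilter (px_array : List (List Int)) : List (List Int) :=
  let laplacian_kernel : List (List Int) := [[1,1,1],[1,-8,1],[1,1,1]]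
  let width : Int := PySem.List.len (PySem.List.pyGetD px_array 0 [])
  let height : Int := PySem.List.len px_array
  let edges := createInitializedGreyscalePixelArray width height 0
  (PySem.List.pyRange 1 (height - 1) 1).foldl (fun edges i =>
    (PySem.List.pyRange 1 (width - 1) 1).foldl (fun edges j =>
      let filtered_value :=
        (PySem.List.pyRange 0 3 1).foldl (fun fv m =>
          (PySem.List.pyRange 0 3 1).foldl (fun fv n =>
            fv + PySem.List.pyGetD (PySem.List.pyGetD laplacian_kernel m []) n 0 *
                 PySem.List.pyGetD (PySem.List.pyGetD px_array (i + m - 1) []) (j + n - 1) 0) fv) 0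
      PySem.List.pySetD edges i (PySem.List.pySetD (PySem.List.pyGetD edges i []) j |filtered_value|)) edges) edges

-- ===== PORT B =====
def applyLaplacianFilter_alt (px_array : List (List Int)) : List (List Int) :=
  let height : Int := PySem.List.len px_array
  let width : Int := PySem.List.len (PySem.List.pyGetD px_array 0 [])
  let edges : List (List Int) :=
    (PySem.List.pyRange 0 height 1).map (fun _ => PySem.List.pyRepeat [(0 : Int)] width)
  if height < 3 ∨ width < 3 then edges else
  (PySem.List.pyRange 1 (height - 1) 1).foldl (fun edges i =>
    let up := PySem.List.pyGetD px_array (i - 1) []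
    let mid := PySem.List.pyGetD px_array i []
    let down := PySem.List.pyGetD px_array (i + 1) []
    let vs := (PySem.List.pyRange 0 width 1).map (fun j =>
      PySem.List.pyGetD up j 0 + PySem.List.pyGetD mid j 0 + PySem.List.pyGetD down j 0)
    let row := PySem.List.pyGetD edges i []
    let row' := (PySem.List.pyRange 1 (width - 1) 1).foldl (fun row j =>
      PySem.List.pySetD row j
        |PySem.List.pyGetD vs (j - 1) 0 + PySem.List.pyGetD vs j 0 + PySem.List.pyGetD vs (j + 1) 0
          - 9 * PySem.List.pyGetD mid j 0|) row
    PySem.List.pySetD edges i row') edges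

-- ===== PRECONDITION & SPEC =====
-- Pre_ excludes exactly the inputs on which the Python A raises IndexError: the empty list
-- (px_array[0]), and, when there are interior pixels (height ≥ 3 and width ≥ 3), any row
-- shorter than width, since A then reads every row at columns 0..width-1.
def Pre_applyLaplacianFilter (px_array : List (List Int)) : Prop :=
  px_array ≠ [] ∧
  (3 ≤ px_array.length ∧ 3 ≤ (px_array.headD []).length →
    ∀ row ∈ px_array, (px_array.headD []).length ≤ row.length)
instance (px_array : List (List Int)) : Decidable (Pre_applyLaplacianFilter px_array) := by
  unfold Pre_applyLaplacianFilter; infer_instance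

def pvWitness_applyLaplacianFilter : List (List Int) :=
  [[1, 2, 3], [4, 5, 6], [7, 8, 9]]

def Spec_applyLaplacianFilter (px_array : List (List Int)) (out : List (List Int)) : Prop := out = applyLaplacianFilter_alt px_array
instance (px_array : List (List Int)) (out : List (List Int)) : Decidable (Spec_applyLaplacianFilter px_array out) := by unfold Spec_applyLaplacianFilter; infer_instance

-- ===== CLAIM (what is proved, stated in full; the proofs are below) =====
def Claim_equal_applyLaplacianFilter : Prop := ∀ (px_array : List (List Int)), Dom_applyLaplacianFilter px_array → Pre_applyLaplacianFilter px_array → Spec_applyLaplacianFilter px_array (applyLaplacianFilter px_array)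

-- ===== LEMMAS AND PROOFS =====

-- A's zero-initialised grid is replicate of replicate.
theorem createInit_eq (w h : Nat) :
    createInitializedGreyscalePixelArray (w : Int) (h : Int) 0 =
      List.replicate h (List.replicate w (0 : Int)) := by
  unfold createInitializedGreyscalePixelArray
  rw [PySem.List.foldl_append_singleton_eq_map, PySem.List.foldl_append_singleton_eq_map]
  simp [List.map_const', PySem.List.length_pyRange_one]

-- B's zero grid is the same replicate of replicate.
theorem edgesB_eq (w h : Nat) :
    (PySem.List.pyRange 0 (h : Int) 1).map (fun _ => PySem.List.pyRepeat [(0 : Int)] (w : Int)) =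
      List.replicate h (List.replicate w (0 : Int)) := by
  simp [PySem.List.pyRepeat_singleton, List.map_const', PySem.List.length_pyRange_one]

-- px_array[0] (with default) is the head row.
theorem getD_zero_eq_headD (px : List (List Int)) : px.getD 0 [] = px.headD [] := by
  cases px <;> simp

-- Updating cell (i, j) of row i repeatedly equals extracting row i, updating it, writing it back.
theorem row_extract (js : List Int) (v : Int → Int) (e : List (List Int)) (i : Int)
    (hi0 : 0 ≤ i) :
    js.foldl (fun e j => PySem.List.pySetD e i (PySem.List.pySetD (PySem.List.pyGetD e i []) j (v j))) e =
      PySem.List.pySetD e i (js.foldl (fun r j => PySem.List.pySetD r j (v j)) (PySem.List.pyGetD e i [])) := by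
  by_cases hilen : i < (e.length : Int)
  · induction js generalizing e with
    | nil =>
      simp only [List.foldl_nil, PySem.List.pySetD_of_nonneg _ _ hi0,
        PySem.List.pyGetD_eq_getElem _ _ hi0 hilen, List.set_getElem_self]
    | cons j js ih =>
      simp only [List.foldl_cons]
      rw [ih _ (by simpa using hilen)]
      rw [PySem.List.pySetD_of_nonneg _ _ hi0, PySem.List.pySetD_of_nonneg _ _ hi0,
        PySem.List.pySetD_of_nonneg _ _ hi0, List.set_set,
        PySem.List.pyGetD_eq_getElem _ _ hi0 (by simpa using hilen),
        PySem.List.pyGetD_eq_getElem _ _ hi0 hilen, List.getElem_set_self]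
  · have hset : ∀ x : List Int, PySem.List.pySetD e i x = e := fun x => by
      rw [PySem.List.pySetD_of_nonneg _ _ hi0]
      exact List.set_eq_of_length_le (by omega)
    have hfix : js.foldl (fun e j => PySem.List.pySetD e i
        (PySem.List.pySetD (PySem.List.pyGetD e i []) j (v j))) e = e := by
      induction js with
      | nil => rfl
      | cons j js ih => rw [List.foldl_cons, hset]; exact ih
    rw [hfix, hset]

-- The 3x3 Laplacian convolution sum at (i, j) equals B's three-vertical-sums expression.
theorem value_eq (px : List (List Int)) (w i j : Int) (hj1 : 1 ≤ j) (hjw : j < w - 1) :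
    (PySem.List.pyRange 0 3 1).foldl (fun fv m =>
      (PySem.List.pyRange 0 3 1).foldl (fun fv n =>
        fv + PySem.List.pyGetD (PySem.List.pyGetD [[1,1,1],[1,-8,1],[1,1,1]] m []) n 0 *
             PySem.List.pyGetD (PySem.List.pyGetD px (i + m - 1) []) (j + n - 1) 0) fv) 0 =
    PySem.List.pyGetD ((PySem.List.pyRange 0 w 1).map (fun k =>
        PySem.List.pyGetD (PySem.List.pyGetD px (i - 1) []) k 0 +
        PySem.List.pyGetD (PySem.List.pyGetD px i []) k 0 +
        PySem.List.pyGetD (PySem.List.pyGetD px (i + 1) []) k 0)) (j - 1) 0 +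
    PySem.List.pyGetD ((PySem.List.pyRange 0 w 1).map (fun k =>
        PySem.List.pyGetD (PySem.List.pyGetD px (i - 1) []) k 0 +
        PySem.List.pyGetD (PySem.List.pyGetD px i []) k 0 +
        PySem.List.pyGetD (PySem.List.pyGetD px (i + 1) []) k 0)) j 0 +
    PySem.List.pyGetD ((PySem.List.pyRange 0 w 1).map (fun k =>
        PySem.List.pyGetD (PySem.List.pyGetD px (i - 1) []) k 0 +
        PySem.List.pyGetD (PySem.List.pyGetD px i []) k 0 +
        PySem.List.pyGetD (PySem.List.pyGetD px (i + 1) []) k 0)) (j + 1) 0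
    - 9 * PySem.List.pyGetD (PySem.List.pyGetD px i []) j 0 := by
  rw [PySem.List.pyGetD_map_pyRange_of_nonneg _ w _ _ (by omega) (by omega),
      PySem.List.pyGetD_map_pyRange_of_nonneg _ w _ _ (by omega) (by omega),
      PySem.List.pyGetD_map_pyRange_of_nonneg _ w _ _ (by omega) (by omega)]
  have h3 : PySem.List.pyRange 0 3 1 = [0, 1, 2] := by decide
  rw [h3]
  simp only [List.foldl_cons, List.foldl_nil,
    show PySem.List.pyGetD ([[1,1,1],[1,-8,1],[1,1,1]] : List (List Int)) 0 [] = [1,1,1] from rfl,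
    show PySem.List.pyGetD ([[1,1,1],[1,-8,1],[1,1,1]] : List (List Int)) 1 [] = [1,-8,1] from rfl,
    show PySem.List.pyGetD ([[1,1,1],[1,-8,1],[1,1,1]] : List (List Int)) 2 [] = [1,1,1] from rfl,
    show PySem.List.pyGetD ([1,1,1] : List Int) 0 0 = 1 from rfl,
    show PySem.List.pyGetD ([1,1,1] : List Int) 1 0 = 1 from rfl,
    show PySem.List.pyGetD ([1,1,1] : List Int) 2 0 = 1 from rfl,
    show PySem.List.pyGetD ([1,-8,1] : List Int) 0 0 = 1 from rfl,
    show PySem.List.pyGetD ([1,-8,1] : List Int) 1 0 = -8 from rfl,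
    show PySem.List.pyGetD ([1,-8,1] : List Int) 2 0 = 1 from rfl]
  ring_nf

-- The two ports agree on every input list.
theorem ports_eq (px : List (List Int)) :
    applyLaplacianFilter px = applyLaplacianFilter_alt px := by
  unfold applyLaplacianFilter applyLaplacianFilter_alt
  simp only [PySem.List.len_eq, PySem.List.pyGetD_zero, getD_zero_eq_headD,
    createInit_eq, edgesB_eq]
  by_cases hsmall : ((px.length : Int) < 3 ∨ ((px.headD []).length : Int) < 3)
  · rw [if_pos hsmall]
    rcases hsmall with hh | hw
    · rw [show PySem.List.pyRange 1 ((px.length : Int) - 1) 1 = []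
          from PySem.List.pyRange_one_eq_nil (by omega), List.foldl_nil]
    · rw [show PySem.List.pyRange 1 (((px.headD []).length : Int) - 1) 1 = []
          from PySem.List.pyRange_one_eq_nil (by omega)]
      simp only [List.foldl_nil]
      exact PySem.List.foldl_ignore _ _
  · rw [if_neg hsmall]
    refine PySem.List.foldl_congr_mem _ _ _ _ ?_
    intro acc i hi
    rw [PySem.List.mem_pyRange_one] at hi
    rw [row_extract _ _ _ _ (by omega)]
    congr 1
    refine PySem.List.foldl_congr_mem _ _ _ _ ?_
    intro r j hj
    rw [PySem.List.mem_pyRange_one] at hj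
    congr 1
    congr 1
    exact value_eq px _ i j (by omega) (by omega)

-- ===== VERDICT (by name: the statement is the Claim_ definition above) =====
theorem applyLaplacianFilter_spec : Claim_equal_applyLaplacianFilter := by
  intro px _ _
  unfold Spec_applyLaplacianFilter
  exact ports_eq px
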